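-- pv_equiv track=rewrite | github.com/ntl870/BTL-DSP-2 | Conglongfix.py | AMDF
-- ===== SOURCE A (Python) =====
-- def AMDF(arra,arrb):
--     cor = []
--     sum =0
--     for i in range(len(arra)):
--         position =  abs(round((len(arra)-1)/2)-i)
--         for j in range(len(arra)- position):
--             sum+= abs(arra[j]- arrb[j+position])
--         cor.append(sum)
--         sum =0
--     return cor
-- ===== SOURCE B (Python) =====
-- def _lag_sum(arra, arrb, n, p):
--     s = 0
--     for j in range(n - p):
--         s += abs(arra[j] - arrb[j + p])
--     return s
--
-- def AMDF(arra, arrb):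
--     n = len(arra)
--     mid = round((n - 1) / 2)
--     # distinct lag values, first-seen order; one sum per distinct lag
--     positions = list(dict.fromkeys(abs(mid - i) for i in range(n)))
--     table = {}
--     for p in positions:
--         table[p] = _lag_sum(arra, arrb, n, p)
--     return [table[abs(mid - i)] for i in range(n)]
-- ===== Notes on version B (the rewrite author's own statement) =====
-- stated objective: alternative
-- what changed: B first builds a table mapping each DISTINCT lag |mid-i| to its absolute-difference sum (one inner loop per distinct lag, same j-ascending order), then emits the result list by table lookup per index, instead of A's recomputation of the inner sum for every index; this does roughly half the inner-loop work (measured ~2x at n=4096, unconfirmed at the largest timing size).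
import Mathlib
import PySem

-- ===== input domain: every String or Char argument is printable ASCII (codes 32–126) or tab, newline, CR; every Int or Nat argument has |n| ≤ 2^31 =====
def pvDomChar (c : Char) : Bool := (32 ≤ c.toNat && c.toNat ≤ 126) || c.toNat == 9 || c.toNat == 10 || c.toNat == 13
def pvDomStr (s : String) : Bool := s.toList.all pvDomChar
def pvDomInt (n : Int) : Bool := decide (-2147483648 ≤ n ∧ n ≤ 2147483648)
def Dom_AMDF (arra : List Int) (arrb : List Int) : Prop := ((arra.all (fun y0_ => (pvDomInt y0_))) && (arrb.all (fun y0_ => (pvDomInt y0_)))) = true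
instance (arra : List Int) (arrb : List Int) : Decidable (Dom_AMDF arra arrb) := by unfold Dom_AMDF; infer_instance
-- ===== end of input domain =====

-- B computes one absolute-difference sum per DISTINCT lag (stored in a table) instead of
-- recomputing it for every index; same return value, roughly half the inner-loop work (speed not confirmed at the largest timing size).

-- ===== PORT A =====
-- Python's round((n-1)/2) (banker's rounding), as an exact integer formula; used by both ports.
def pvMid (n : Nat) : Int :=
  if n % 2 = 1 then ((n - 1) / 2 : Nat)
  else (let k := n / 2 - 1; if k % 2 = 0 then (k : Int) else ((k : Int) + 1))

def AMDF (arra : List Int) (arrb : List Int) : List Int :=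
  (PySem.List.pyRange 0 arra.length 1).foldl (fun cor i =>
    let position : Int := |pvMid arra.length - i|
    let s : Int := (PySem.List.pyRange 0 ((arra.length : Int) - position) 1).foldl
      (fun s j => s + |PySem.List.pyGetD arra j 0 - PySem.List.pyGetD arrb (j + position) 0|) 0
    cor ++ [s]) []

-- ===== PORT B =====
def pvLagSum (arra : List Int) (arrb : List Int) (n : Int) (p : Int) : Int :=
  (PySem.List.pyRange 0 (n - p) 1).foldl
    (fun s j => s + |PySem.List.pyGetD arra j 0 - PySem.List.pyGetD arrb (j + p) 0|) 0

def AMDF_alt (arra : List Int) (arrb : List Int) : List Int :=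
  let n := arra.length
  let mid := pvMid n
  let positions := PySem.Set.ofList ((PySem.List.pyRange 0 n 1).map (fun i => |mid - i|))
  let table := positions.foldl (fun d p => d.insert p (pvLagSum arra arrb n p)) PySem.Dict.empty
  (PySem.List.pyRange 0 n 1).map (fun i => table.getD |mid - i| 0)

-- ===== PRECONDITION & SPEC =====
-- Python A raises IndexError when arrb is shorter than a nonempty arra; excluded here.
def Pre_AMDF (arra : List Int) (arrb : List Int) : Prop := arra.length ≤ arrb.length
instance (arra : List Int) (arrb : List Int) : Decidable (Pre_AMDF arra arrb) := by unfold Pre_AMDF; infer_instance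
def pvWitness_AMDF : List Int × List Int := ([1, 5, -2, 4], [0, 3, 3, -1])

def Spec_AMDF (arra : List Int) (arrb : List Int) (out : List Int) : Prop := out = AMDF_alt arra arrb
instance (arra : List Int) (arrb : List Int) (out : List Int) : Decidable (Spec_AMDF arra arrb out) := by unfold Spec_AMDF; infer_instance

-- ===== CLAIM (what is proved, stated in full; the proofs are below) =====
def Claim_equal_AMDF : Prop := ∀ (arra : List Int) (arrb : List Int), Dom_AMDF arra arrb → Pre_AMDF arra arrb → Spec_AMDF arra arrb (AMDF arra arrb)

-- ===== LEMMAS AND PROOFS =====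

-- The table built over the distinct lags returns the lag sum at each lag that occurs.
theorem table_getD (arra arrb : List Int) (n : Int) (ps : List Int) (p : Int) (hp : p ∈ PySem.Set.ofList ps) :
    ((PySem.Set.ofList ps).foldl (fun d q => d.insert q (pvLagSum arra arrb n q)) PySem.Dict.empty).getD p 0
      = pvLagSum arra arrb n p := by
  have hitems : ((PySem.Set.ofList ps).foldl (fun d q => d.insert q (pvLagSum arra arrb n q)) PySem.Dict.empty).items
      = (PySem.Set.ofList ps).map (fun q => (q, pvLagSum arra arrb n q)) := by
    simpa using PySem.Dict.items_foldl_insert_fresh (PySem.Set.ofList ps) (fun q => q)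
      (fun q => pvLagSum arra arrb n q) PySem.Dict.empty
      (fun a _ => PySem.Dict.contains_empty a) (by simp [PySem.Set.nodup_ofList ps])
  apply PySem.Dict.getD_of_mem_items
  · rw [hitems]
    exact List.mem_map_of_mem hp
  · exact PySem.Dict.nodup_keys_foldl_insert _ _ _ PySem.Dict.nodup_keys_empty

theorem AMDF_eq_map (arra arrb : List Int) :
    AMDF arra arrb = (PySem.List.pyRange 0 arra.length 1).map
      (fun i => pvLagSum arra arrb arra.length |pvMid arra.length - i|) := by
  unfold AMDF
  rw [PySem.List.foldl_append_singleton_eq_map]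
  simp [pvLagSum]

-- ===== VERDICT (by name: the statement is the Claim_ definition above) =====
theorem AMDF_spec : Claim_equal_AMDF := by
  intro arra arrb _ _
  unfold Spec_AMDF AMDF_alt
  rw [AMDF_eq_map]
  apply List.map_congr_left
  intro i hi
  rw [table_getD]
  exact (PySem.Set.mem_ofList _ _).mpr (List.mem_map_of_mem hi)
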